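-- pv_equiv track=rewrite | github.com/surya97036/First-Round-Interview-Application-Developer---University-of-Illinois | training_analysis.py | count_completed_trainings
-- ===== SOURCE A (Python) =====
-- from collections import defaultdict
--
-- def count_completed_trainings(data):
--     training_counts = defaultdict(int)  # Initializing a dictionary to hold training names and their counts.
--
--     for person in data:
--         completed_trainings = set()  # Using a set to ensure each person is counted only once per training.
--
--         # Iterating over the list of completions for each person.
--         for completion in person["completions"]:
--             # If the training is not yet counted for this person, adding them to the count.
--             if completion["name"] not in completed_trainings:
--                 training_counts[completion["name"]] += 1  # Incrementing the count for the training.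
--                 completed_trainings.add(completion["name"])  # Adding the training to the set of completed trainings for this person.
--
--     return training_counts
-- ===== SOURCE B (Python) =====
-- from collections import defaultdict
--
-- def count_completed_trainings(data):
--     # Transposed algorithm: first collect every distinct training name (in order
--     # of first appearance), then for EACH training scan all people and count how
--     # many completed it at least once.
--     names = dict.fromkeys(c["name"] for person in data for c in person["completions"])
--     counts = defaultdict(int)
--     for name in names:
--         counts[name] = sum(any(c["name"] == name for c in person["completions"])
--                            for person in data)
--     return counts
-- ===== Notes on version B (the rewrite author's own statement) =====
-- stated objective: alternative
-- what changed: A streams once over all completions with a per-person seen-set and increments counts as it goes; B transposes the loops: it first collects the distinct training names, then for each training scans every person and counts those who completed it, so no running counter dict and no per-person set is maintained.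
import Mathlib
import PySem

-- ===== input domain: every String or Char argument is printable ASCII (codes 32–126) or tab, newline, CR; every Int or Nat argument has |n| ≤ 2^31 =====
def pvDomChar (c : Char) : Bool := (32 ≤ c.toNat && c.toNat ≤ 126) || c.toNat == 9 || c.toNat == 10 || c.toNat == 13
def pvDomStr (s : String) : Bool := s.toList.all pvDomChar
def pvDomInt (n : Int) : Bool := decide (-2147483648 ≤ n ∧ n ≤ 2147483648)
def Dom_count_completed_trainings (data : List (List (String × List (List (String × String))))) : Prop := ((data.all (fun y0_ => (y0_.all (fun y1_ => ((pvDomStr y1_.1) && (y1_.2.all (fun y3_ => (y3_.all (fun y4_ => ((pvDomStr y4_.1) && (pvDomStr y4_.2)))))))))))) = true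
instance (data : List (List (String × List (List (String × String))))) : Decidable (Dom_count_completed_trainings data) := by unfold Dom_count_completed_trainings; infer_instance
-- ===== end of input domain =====

-- B transposes A's loops: A streams once over all completions with a per-person
-- seen-set and a running counter dict; B first collects the distinct training
-- names, then for each training scans all people and counts those who completed
-- it. Same return value; not claimed faster.

-- ===== PORT A =====
-- person["completions"] / completion["name"] raise KeyError when absent; Pre_ excludes
-- those inputs, the port uses getD with an unreachable default there.
def count_completed_trainings (data : List (List (String × List (List (String × String))))) : List (String × Int) :=
  (data.foldl (fun counts person =>
    (((PySem.Dict.mk person).getD "completions" []).foldl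
      (fun (st : PySem.Dict String Int × PySem.Set String) completion =>
        if PySem.Set.contains st.2 ((PySem.Dict.mk completion).getD "name" "") then st
        else (st.1.modify ((PySem.Dict.mk completion).getD "name" "") 0 (· + 1),
              PySem.Set.add st.2 ((PySem.Dict.mk completion).getD "name" "")))
      (counts, PySem.Set.empty)).1)
    PySem.Dict.empty).items

-- ===== PORT B =====
def count_completed_trainings_alt (data : List (List (String × List (List (String × String))))) : List (String × Int) :=
  let names := PySem.List.dedup (data.flatMap (fun person =>
    ((PySem.Dict.mk person).getD "completions" []).map
      (fun c => (PySem.Dict.mk c).getD "name" "")))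
  (names.foldl (fun (counts : PySem.Dict String Int) name =>
      counts.insert name
        ((data.map (fun person =>
          if ((PySem.Dict.mk person).getD "completions" []).any
              (fun c => (PySem.Dict.mk c).getD "name" "" == name)
          then (1 : Int) else 0)).sum))
    PySem.Dict.empty).items

-- ===== PRECONDITION & SPEC =====
-- Pre_ excludes exactly the inputs where Python A raises KeyError: a person dict
-- without the "completions" key, or a completion dict without the "name" key.
def Pre_count_completed_trainings (data : List (List (String × List (List (String × String))))) : Prop :=
  ∀ person ∈ data, (PySem.Dict.mk person).contains "completions" = true ∧
    ∀ c ∈ (PySem.Dict.mk person).getD "completions" [], (PySem.Dict.mk c).contains "name" = true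
instance (data : List (List (String × List (List (String × String))))) : Decidable (Pre_count_completed_trainings data) := by unfold Pre_count_completed_trainings; infer_instance

def pvWitness_count_completed_trainings : (List (List (String × List (List (String × String))))) :=
  [[("completions", [[("name", "safety")], [("name", "safety")], [("name", "cpr")]])],
   [("completions", [[("name", "cpr")]])]]

def Spec_count_completed_trainings (data : List (List (String × List (List (String × String))))) (out : List (String × Int)) : Prop := out = count_completed_trainings_alt data
instance (data : List (List (String × List (List (String × String))))) (out : List (String × Int)) : Decidable (Spec_count_completed_trainings data out) := by unfold Spec_count_completed_trainings; infer_instance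

-- ===== CLAIM (what is proved, stated in full; the proofs are below) =====
def Claim_equal_count_completed_trainings : Prop := ∀ (data : List (List (String × List (List (String × String))))), Dom_count_completed_trainings data → Pre_count_completed_trainings data → Spec_count_completed_trainings data (count_completed_trainings data)

-- ===== LEMMAS AND PROOFS =====

-- the training names of one person, in completion order
def pvNames (person : List (String × List (List (String × String)))) : List String :=
  ((PySem.Dict.mk person).getD "completions" []).map (fun c => (PySem.Dict.mk c).getD "name" "")

-- the new (not-yet-seen) names of a list, in first-occurrence order
def pvNew (s : PySem.Set String) : List String → List String
  | [] => []
  | n :: t => if PySem.Set.contains s n then pvNew s t else n :: pvNew (PySem.Set.add s n) t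

lemma pvInner_eq (l : List String) : ∀ (d : PySem.Dict String Int) (s : PySem.Set String),
    (l.foldl (fun st n => if PySem.Set.contains st.2 n then st
        else (st.1.modify n 0 (· + 1), PySem.Set.add st.2 n)) (d, s)).1
    = (pvNew s l).foldl (fun d n => d.modify n 0 (· + 1)) d := by
  induction l with
  | nil => intro d s; simp [pvNew]
  | cons n t ih =>
    intro d s
    simp only [pvNew]
    rw [List.foldl_cons]
    by_cases hm : PySem.Set.contains s n = true
    · rw [if_pos hm, if_pos (show PySem.Set.contains (d, s).2 n = true from hm), ih]
    · rw [if_neg hm, if_neg (show ¬ PySem.Set.contains (d, s).2 n = true from hm), ih,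
        List.foldl_cons]

lemma pvUpdate_eq_append_pvNew (l : List String) : ∀ s : PySem.Set String,
    PySem.Set.update s l = s ++ pvNew s l := by
  induction l with
  | nil => intro s; simp [PySem.Set.update, pvNew]
  | cons n t ih =>
    intro s
    by_cases hm : n ∈ s
    · have : PySem.Set.update s (n :: t) = PySem.Set.update (PySem.Set.add s n) t := rfl
      rw [this]
      simp only [pvNew]
      simp [PySem.Set.add, hm, ih s]
    · have : PySem.Set.update s (n :: t) = PySem.Set.update (PySem.Set.add s n) t := rfl
      rw [this, ih (PySem.Set.add s n)]
      simp only [pvNew]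
      simp [PySem.Set.add, hm]

lemma pvNew_empty (l : List String) : pvNew PySem.Set.empty l = PySem.List.dedup l := by
  have := pvUpdate_eq_append_pvNew l PySem.Set.empty
  simpa [PySem.Set.empty, PySem.List.dedup_eq_ofList, PySem.Set.ofList_eq_foldl,
    PySem.Set.update] using this.symm

-- A's fold over data equals Counter over the per-person-deduped name stream
lemma pvOuter_eq (data : List (List (String × List (List (String × String))))) :
    ∀ d : PySem.Dict String Int,
    data.foldl (fun counts person =>
      (((PySem.Dict.mk person).getD "completions" []).foldl
        (fun (st : PySem.Dict String Int × PySem.Set String) completion =>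
          if PySem.Set.contains st.2 ((PySem.Dict.mk completion).getD "name" "") then st
          else (st.1.modify ((PySem.Dict.mk completion).getD "name" "") 0 (· + 1),
                PySem.Set.add st.2 ((PySem.Dict.mk completion).getD "name" "")))
        (counts, PySem.Set.empty)).1) d
    = (data.flatMap (fun person => PySem.List.dedup (pvNames person))).foldl
        (fun d n => d.modify n 0 (· + 1)) d := by
  induction data with
  | nil => intro d; rfl
  | cons person rest ih =>
    intro d
    rw [List.flatMap_cons, List.foldl_append, List.foldl_cons, ← ih]
    congr 1
    rw [show PySem.List.dedup (pvNames person)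
        = PySem.List.dedup (((PySem.Dict.mk person).getD "completions" []).map
            (fun c => (PySem.Dict.mk c).getD "name" "")) from rfl]
    rw [← List.foldl_map (f := fun c => (PySem.Dict.mk c).getD "name" "")
        (g := fun (st : PySem.Dict String Int × PySem.Set String) n =>
          if PySem.Set.contains st.2 n then st
          else (st.1.modify n 0 (· + 1), PySem.Set.add st.2 n))]
    rw [pvInner_eq, pvNew_empty]

-- scanning an already-deduped list finds the same new names
lemma pvContains_iff_mem (u : PySem.Set String) (x : String) :
    PySem.Set.contains u x = true ↔ x ∈ u := by
  simp [PySem.Set.contains]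

lemma pvNew_pvNew (l : List String) : ∀ (s t : PySem.Set String),
    (∀ x, PySem.Set.contains t x = true → PySem.Set.contains s x = true) →
    pvNew s (pvNew t l) = pvNew s l := by
  induction l with
  | nil => intro s t _; rfl
  | cons n l ih =>
    intro s t hst
    have hadd : ∀ (u : PySem.Set String) x,
        PySem.Set.contains (PySem.Set.add u n) x = true ↔ (x ∈ u ∨ x = n) := by
      intro u x
      rw [pvContains_iff_mem]
      exact PySem.Set.mem_add u n x
    simp only [pvNew]
    by_cases ht : PySem.Set.contains t n = true
    · rw [if_pos ht, if_pos (hst n ht), ih s t hst]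
    · rw [if_neg ht]
      simp only [pvNew]
      by_cases hs : PySem.Set.contains s n = true
      · rw [if_pos hs, if_pos hs, ih s (PySem.Set.add t n)]
        intro x hx
        rcases (hadd t x).mp hx with h | h
        · exact hst x ((pvContains_iff_mem t x).mpr h)
        · exact h ▸ hs
      · rw [if_neg hs, if_neg hs, ih (PySem.Set.add s n) (PySem.Set.add t n)]
        intro x hx
        rcases (hadd t x).mp hx with h | h
        · exact (hadd s x).mpr (Or.inl ((pvContains_iff_mem s x).mp
            (hst x ((pvContains_iff_mem t x).mpr h))))
        · exact (hadd s x).mpr (Or.inr h)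

lemma pvNew_dedup (s : PySem.Set String) (l : List String) :
    pvNew s (PySem.List.dedup l) = pvNew s l := by
  rw [← pvNew_empty, pvNew_pvNew]
  intro x hx
  simp [PySem.Set.empty, PySem.Set.contains] at hx

-- deduping each person's names before flattening yields the same distinct-name list
lemma pvOfList_flatMap (data : List (List (String × List (List (String × String))))) :
    ∀ s : PySem.Set String,
    PySem.Set.update s (data.flatMap (fun p => PySem.List.dedup (pvNames p)))
    = PySem.Set.update s (data.flatMap (fun p => pvNames p)) := by
  induction data with
  | nil => intro s; rfl
  | cons p rest ih =>
    intro s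
    have hsplit : ∀ (s : PySem.Set String) (a b : List String),
        PySem.Set.update s (a ++ b) = PySem.Set.update (PySem.Set.update s a) b :=
      fun s a b => List.foldl_append ..
    rw [List.flatMap_cons, List.flatMap_cons,
      hsplit s (PySem.List.dedup (pvNames p)),
      hsplit s (pvNames p), ih]
    congr 1
    rw [pvUpdate_eq_append_pvNew (PySem.List.dedup (pvNames p)) s,
      pvUpdate_eq_append_pvNew (pvNames p) s, pvNew_dedup]

-- the count of k in the per-person-deduped stream is the number of people who have k
lemma pvCount_flatMap (data : List (List (String × List (List (String × String))))) (k : String) :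
    (((data.flatMap (fun p => PySem.List.dedup (pvNames p))).count k : Nat) : Int)
    = (data.map (fun person =>
        if ((PySem.Dict.mk person).getD "completions" []).any
            (fun c => (PySem.Dict.mk c).getD "name" "" == k)
        then (1 : Int) else 0)).sum := by
  rw [List.count_flatMap, Nat.cast_list_sum, List.map_map]
  apply congrArg List.sum
  apply List.map_congr_left
  intro p _
  simp only [Function.comp]
  have hany : (((PySem.Dict.mk p).getD "completions" []).any
      (fun c => (PySem.Dict.mk c).getD "name" "" == k)) = true ↔ k ∈ pvNames p := by
    simp [pvNames, List.any_eq_true, List.mem_map]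
  by_cases hm : k ∈ pvNames p
  · rw [List.count_eq_one_of_mem (by simp)
      (by rw [PySem.List.mem_dedup]; exact hm)]
    simp [hany, hm]
  · rw [List.count_eq_zero_of_not_mem (by rw [PySem.List.mem_dedup]; exact hm)]
    simp [hany, hm]

-- ===== VERDICT (by name: the statement is the Claim_ definition above) =====
theorem count_completed_trainings_spec : Claim_equal_count_completed_trainings := by
  intro data _ _
  unfold Spec_count_completed_trainings count_completed_trainings count_completed_trainings_alt
  dsimp only
  rw [pvOuter_eq data PySem.Dict.empty, ← PySem.Dict.counter_eq_foldl,
    PySem.Dict.items_counter]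
  rw [PySem.Dict.items_foldl_insert_fresh
      (PySem.List.dedup (data.flatMap (fun person =>
        ((PySem.Dict.mk person).getD "completions" []).map
          (fun c => (PySem.Dict.mk c).getD "name" ""))))
      (fun a => a) _ _
      (fun a _ => PySem.Dict.contains_empty a)
      (by simp)]
  rw [show PySem.Dict.empty.items = ([] : List (String × Int)) from rfl, List.nil_append]
  have hkeys : PySem.Set.ofList (data.flatMap (fun p => PySem.List.dedup (pvNames p)))
      = PySem.List.dedup (data.flatMap (fun person =>
          ((PySem.Dict.mk person).getD "completions" []).map
            (fun c => (PySem.Dict.mk c).getD "name" ""))) := by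
    rw [PySem.List.dedup_eq_ofList, PySem.Set.ofList_eq_foldl, PySem.Set.ofList_eq_foldl]
    exact pvOfList_flatMap data []
  rw [← hkeys]
  apply List.map_congr_left
  intro k _
  rw [← pvCount_flatMap data k]
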